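-- pv_equiv track=rewrite | github.com/MNico99/Sintaxis-TP02 | automatas.py | A_String
-- ===== SOURCE A (Python) =====
-- TRAMPA = -1
--
-- RESULTADO_ACEPTADO = "ACEPTADO"
--
-- RESULTADO_TRAMPA = "TRAMPA"
--
-- RESULTADO_NO_ACEPTADO = "NO_ACEPTADO"
--
-- digito = ["0", "1", "2", "3", "4", "5", "6", "7", "8", "9"]
--
-- def d_String(estado_anterior, caracter):
--     if estado_anterior == 0 and caracter == "'":
--         return 1
--     if estado_anterior == 1 and caracter.isalpha():
--         return 2
--     if estado_anterior == 1 and caracter in digito: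
--         return 2
--     if estado_anterior == 2 and caracter.isalpha():
--         return 2
--     if estado_anterior == 2 and caracter in digito:
--         return 2
--     if estado_anterior == 2 and caracter == "'":
--         return 3
--
--
--     return TRAMPA
--
-- def A_String(cadena):
--     Finales = [3]
--     estado_actual = 0
--
--     for caracter in cadena:
--         estado_proximo = d_String(estado_actual, caracter)
--         if estado_proximo == TRAMPA:
--             return RESULTADO_TRAMPA
--         estado_actual = estado_proximo
--
--     if estado_actual in Finales:
--         return RESULTADO_ACEPTADO
--     else:
--         return RESULTADO_NO_ACEPTADO
-- ===== SOURCE B (Python) =====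
-- digito = ["0", "1", "2", "3", "4", "5", "6", "7", "8", "9"]
--
-- RESULTADO_ACEPTADO = "ACEPTADO"
-- RESULTADO_TRAMPA = "TRAMPA"
-- RESULTADO_NO_ACEPTADO = "NO_ACEPTADO"
--
-- def A_String(cadena):
--     # Must start with a quote, hold at least one identifier char
--     # (letter or digit), and end with the closing quote.
--     if cadena == "":
--         return RESULTADO_NO_ACEPTADO
--     if cadena[0] != "'":
--         return RESULTADO_TRAMPA
--     n = len(cadena)
--     i = 1
--     while i < n and (cadena[i].isalpha() or cadena[i] in digito):
--         i += 1
--     if i == n: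
--         return RESULTADO_NO_ACEPTADO
--     if cadena[i] != "'":
--         return RESULTADO_TRAMPA
--     if i == 1:
--         return RESULTADO_TRAMPA
--     if i == n - 1:
--         return RESULTADO_ACEPTADO
--     return RESULTADO_TRAMPA
-- ===== Notes on version B (the rewrite author's own statement) =====
-- stated objective: simpler
-- what changed: Replaces the DFA transition-function loop by a direct shape check: verify the opening quote, scan past the letter/digit run with one while loop, then classify by where the scan stopped.
import Mathlib
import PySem

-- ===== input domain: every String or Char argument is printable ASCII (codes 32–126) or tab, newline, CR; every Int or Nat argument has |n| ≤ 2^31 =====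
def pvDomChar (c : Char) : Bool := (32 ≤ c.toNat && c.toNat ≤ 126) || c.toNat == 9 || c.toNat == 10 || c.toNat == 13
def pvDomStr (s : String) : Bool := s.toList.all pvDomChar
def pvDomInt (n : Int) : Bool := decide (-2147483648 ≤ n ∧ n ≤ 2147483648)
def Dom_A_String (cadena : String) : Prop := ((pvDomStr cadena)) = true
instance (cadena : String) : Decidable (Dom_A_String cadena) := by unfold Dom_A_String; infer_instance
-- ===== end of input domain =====

-- B replaces A's DFA transition loop by a direct shape check (one scan past the
-- letter/digit run, then classify by where it stopped); same cost, simpler.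
-- PySem.Chars.isalpha is exact for Python's str.isalpha on the ASCII domain.

-- ===== PORT A =====
-- shared module constant `digito` of Source A/Source B
def digito : List Char := ['0', '1', '2', '3', '4', '5', '6', '7', '8', '9']

def dString (estadoAnterior : Int) (caracter : Char) : Int :=
  if estadoAnterior = 0 ∧ caracter = '\'' then 1
  else if estadoAnterior = 1 ∧ PySem.Chars.isalpha caracter = true then 2
  else if estadoAnterior = 1 ∧ caracter ∈ digito then 2
  else if estadoAnterior = 2 ∧ PySem.Chars.isalpha caracter = true then 2
  else if estadoAnterior = 2 ∧ caracter ∈ digito then 2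
  else if estadoAnterior = 2 ∧ caracter = '\'' then 3
  else (-1)

def aLoop (estadoActual : Int) : List Char → String
  | [] => if estadoActual ∈ [(3 : Int)] then "ACEPTADO" else "NO_ACEPTADO"
  | caracter :: rest =>
    let estadoProximo := dString estadoActual caracter
    if estadoProximo = -1 then "TRAMPA" else aLoop estadoProximo rest

def A_String (cadena : String) : String := aLoop 0 cadena.toList

-- ===== PORT B =====
def bIsIdent (c : Char) : Bool := PySem.Chars.isalpha c || decide (c ∈ digito)

-- the while loop of B: advance past identifier chars (seen = "i > 1"), then classify
def bScan : List Char → Bool → String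
  | [], _ => "NO_ACEPTADO"
  | c :: rest, seen =>
    if bIsIdent c then bScan rest true
    else if c ≠ '\'' then "TRAMPA"
    else if seen = false then "TRAMPA"
    else if rest = [] then "ACEPTADO" else "TRAMPA"

def A_String_alt (cadena : String) : String :=
  match cadena.toList with
  | [] => "NO_ACEPTADO"
  | c :: rest => if c ≠ '\'' then "TRAMPA" else bScan rest false

-- ===== PRECONDITION & SPEC =====
def Spec_A_String (cadena : String) (out : String) : Prop := out = A_String_alt cadena
instance (cadena : String) (out : String) : Decidable (Spec_A_String cadena out) := by unfold Spec_A_String; infer_instance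

-- ===== CLAIM (what is proved, stated in full; the proofs are below) =====
def Claim_equal_A_String : Prop := ∀ (cadena : String), Dom_A_String cadena → Spec_A_String cadena (A_String cadena)

-- ===== LEMMAS AND PROOFS =====

lemma dString_three (c : Char) : dString 3 c = -1 := by
  simp [dString]

lemma aLoop_three (cs : List Char) :
    aLoop 3 cs = if cs = [] then "ACEPTADO" else "TRAMPA" := by
  cases cs with
  | nil => simp [aLoop]
  | cons c cs => simp [aLoop, dString_three]

lemma aLoop_one_two (cs : List Char) :
    aLoop 1 cs = bScan cs false ∧ aLoop 2 cs = bScan cs true := by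
  induction cs with
  | nil => simp [aLoop, bScan]
  | cons c cs ih =>
    by_cases hid : bIsIdent c = true
    · have h1 : dString 1 c = 2 := by
        rcases (by simpa [bIsIdent] using hid : PySem.Chars.isalpha c = true ∨ c ∈ digito) with h | h
        · simp [dString, h]
        · have hm : c ∈ digito := h
          simp [dString, hm]
      have h2 : dString 2 c = 2 := by
        rcases (by simpa [bIsIdent] using hid : PySem.Chars.isalpha c = true ∨ c ∈ digito) with h | h
        · simp [dString, h]
        · have hm : c ∈ digito := h
          simp [dString, hm]
      simp [aLoop, bScan, h1, h2, hid, ih.2]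
    · have ha : ¬ PySem.Chars.isalpha c = true := by
        intro h; exact hid (by simp [bIsIdent, h])
      have hd : c ∉ digito := by
        intro h; exact hid (by simp [bIsIdent, h])
      have hdA : c ∉ digito := hd
      by_cases hq : c = '\''
      · subst hq
        have h1 : dString 1 '\'' = -1 := by simp [dString, ha, hdA]
        have h2 : dString 2 '\'' = 3 := by simp [dString, ha, hdA]
        simp [aLoop, bScan, h1, h2, hid, aLoop_three]
      · have h1 : dString 1 c = -1 := by simp [dString, ha, hdA, hq]
        have h2 : dString 2 c = -1 := by simp [dString, ha, hdA, hq]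
        simp [aLoop, bScan, h1, h2, hid, hq]

-- ===== VERDICT (by name: the statement is the Claim_ definition above) =====
theorem A_String_spec : Claim_equal_A_String := by
  intro cadena _
  unfold Spec_A_String A_String A_String_alt
  cases h : cadena.toList with
  | nil => simp [aLoop]
  | cons c rest =>
    by_cases hq : c = '\''
    · subst hq
      have h0 : dString 0 '\'' = 1 := by simp [dString]
      simp [aLoop, h0, (aLoop_one_two rest).1]
    · have h0 : dString 0 c = -1 := by simp [dString, hq]
      simp [aLoop, h0, hq]
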